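-- pv_equiv track=rewrite | github.com/charbelc15/IDPA_p2 | Project2_parts/Part2_Indexing/order_docs.py | order_docs
-- ===== SOURCE A (Python) =====
-- import operator
--
-- def order_docs(Keywords_docIDs):
--
--     ordered_docs={}
--
--     for key in Keywords_docIDs:
--         value = Keywords_docIDs[key]
--
--         for val in value:
--             docID=val[0]
--             word_weight=val[1]
--
--             #if word_weight bigger than one before --> doc's word weight updated
--             if(docID in ordered_docs.keys()):
--                 if(word_weight>ordered_docs[docID]):
--                      ordered_docs[docID]=word_weight
--
--             #if docID's word_weight hasnt been inserted it
--             else: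
--                 ordered_docs[docID]=word_weight
--
--     #order dict. by descending order of values
--     ordered_docs = dict( sorted(ordered_docs.items(), key=operator.itemgetter(1),reverse=True))
--
--     return ordered_docs
-- ===== SOURCE B (Python) =====
-- def order_docs(Keywords_docIDs):
--     # collect every weight per docID (first-occurrence order), then reduce with max, then sort
--     groups = {}
--     for weights in Keywords_docIDs.values():
--         for docID, w in weights:
--             groups.setdefault(docID, []).append(w)
--     best = {docID: max(ws) for docID, ws in groups.items()}
--     return dict(sorted(best.items(), key=lambda kv: kv[1], reverse=True))
-- ===== Notes on version B (the rewrite author's own statement) =====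
-- stated objective: alternative
-- what changed: A maintains a running-max dict with a contains/compare/overwrite branch per pair and re-looks each key up in the input dict; B iterates the value lists directly, collects every weight per docID into a groups dict (collect-then-reduce), takes max per group in a second pass, and sorts; Pre_ excludes association lists with duplicate top-level keys, which do not represent any Python dict and on which A's per-key re-lookup reuses the first value.
import Mathlib
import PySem

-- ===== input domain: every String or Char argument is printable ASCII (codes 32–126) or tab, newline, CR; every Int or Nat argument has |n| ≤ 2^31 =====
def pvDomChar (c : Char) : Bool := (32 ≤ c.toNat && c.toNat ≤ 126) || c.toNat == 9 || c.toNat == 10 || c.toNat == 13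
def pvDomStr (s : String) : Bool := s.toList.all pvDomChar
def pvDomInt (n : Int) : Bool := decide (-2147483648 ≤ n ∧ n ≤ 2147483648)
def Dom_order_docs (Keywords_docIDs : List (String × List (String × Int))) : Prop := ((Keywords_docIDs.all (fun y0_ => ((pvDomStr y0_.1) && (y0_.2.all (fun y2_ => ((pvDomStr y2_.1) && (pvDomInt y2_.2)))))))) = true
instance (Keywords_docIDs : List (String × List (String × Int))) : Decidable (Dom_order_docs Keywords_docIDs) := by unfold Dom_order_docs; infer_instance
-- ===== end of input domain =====

-- B replaces A's running-max dict (with per-key re-lookup in the input dict) by a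
-- collect-then-reduce decomposition: group all weights per docID, then max, then sort.


-- ===== PORT A =====
-- step of A's inner loop (one (docID, word_weight) pair into the running-max dict);
-- `ordered_docs[docID]` is read with getD _ 0: under the `contains` guard the key is
-- present, so the default is never used and the lookup is exact.
def pvStepA (d : PySem.Dict String Int) (val : String × Int) : PySem.Dict String Int :=
  if d.contains val.1 then
    (if val.2 > d.getD val.1 0 then d.insert val.1 val.2 else d)
  else d.insert val.1 val.2

def order_docs (Keywords_docIDs : List (String × List (String × Int))) : List (String × Int) :=
  -- `Keywords_docIDs[key]` is read with getD _ []: key is iterated from the dict itself,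
  -- so the lookup never raises and the default is never used.
  let ordered : PySem.Dict String Int :=
    Keywords_docIDs.foldl
      (fun d kv =>
        let value := (PySem.Dict.mk Keywords_docIDs).getD kv.1 []
        value.foldl pvStepA d)
      PySem.Dict.empty
  (PySem.Dict.ofList (PySem.List.sorted ordered.items (fun kv => kv.2) true)).items

-- ===== PORT B =====
-- max(ws); in B every group list is nonempty, so the [] case is unreachable
def pyMaxInt : List Int → Int
  | [] => 0
  | w :: ws => ws.foldl max w

def order_docs_alt (Keywords_docIDs : List (String × List (String × Int))) : List (String × Int) :=
  -- groups.setdefault(docID, []).append(w)  ==  groups[docID] = groups.get(docID, []) + [w]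
  let groups : PySem.Dict String (List Int) :=
    Keywords_docIDs.foldl
      (fun g kv => kv.2.foldl (fun g p => g.modify p.1 [] (fun ws => ws ++ [p.2])) g)
      PySem.Dict.empty
  let best : PySem.Dict String Int :=
    PySem.Dict.mk (groups.items.map (fun kv => (kv.1, pyMaxInt kv.2)))
  (PySem.Dict.ofList (PySem.List.sorted best.items (fun kv => kv.2) true)).items

-- ===== PRECONDITION & SPEC =====
-- Pre_ excludes association lists with duplicate top-level keys: these represent no
-- Python dict (the parameter is a dict), and on them A's per-key re-lookup reuses the
-- first value while B consumes each entry's own list — neither behaviour is a dict's.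
def Pre_order_docs (Keywords_docIDs : List (String × List (String × Int))) : Prop :=
  (Keywords_docIDs.map (·.1)).Nodup
instance (Keywords_docIDs : List (String × List (String × Int))) : Decidable (Pre_order_docs Keywords_docIDs) := by unfold Pre_order_docs; infer_instance

def pvWitness_order_docs : (List (String × List (String × Int))) :=
  [("a", [("d1", 2), ("d2", 1)]), ("b", [("d1", 3)])]

def Spec_order_docs (Keywords_docIDs : List (String × List (String × Int))) (out : List (String × Int)) : Prop := out = order_docs_alt Keywords_docIDs
instance (Keywords_docIDs : List (String × List (String × Int))) (out : List (String × Int)) : Decidable (Spec_order_docs Keywords_docIDs out) := by unfold Spec_order_docs; infer_instance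

-- ===== CLAIM (what is proved, stated in full; the proofs are below) =====
def Claim_equal_order_docs : Prop := ∀ (Keywords_docIDs : List (String × List (String × Int))), Dom_order_docs Keywords_docIDs → Pre_order_docs Keywords_docIDs → Spec_order_docs Keywords_docIDs (order_docs Keywords_docIDs)

-- ===== LEMMAS AND PROOFS =====

-- a nested for-loop is a fold over the flattened stream
theorem pv_foldl_nested {A B C : Type} (l : List A) (f : A → List B) (step : C → B → C)
    (init : C) :
    l.foldl (fun d kv => (f kv).foldl step d) init = (l.flatMap f).foldl step init := by
  induction l generalizing init with
  | nil => rfl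
  | cons h t ih => simp [List.flatMap_cons, List.foldl_append, ih]

-- one A-step adds the pair's key to the key set
theorem pv_keys_stepA (d : PySem.Dict String Int) (p : String × Int) :
    (pvStepA d p).keys = PySem.Set.add d.keys p.1 := by
  unfold pvStepA
  by_cases hc : d.contains p.1 = true
  · rw [PySem.Set.add_of_mem ((PySem.Dict.contains_iff_mem_keys d p.1).1 hc)]
    simp only [hc, if_true]
    split
    · exact PySem.Dict.keys_insert_of_contains d _ hc
    · rfl
  · have hc' : d.contains p.1 = false := by simpa using hc
    have hmem : p.1 ∉ d.keys := fun h => hc ((PySem.Dict.contains_iff_mem_keys d p.1).2 h)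
    rw [PySem.Set.add_of_not_mem hmem]
    simp only [hc', if_neg, Bool.false_eq_true, not_false_iff]
    exact PySem.Dict.keys_insert_of_not_contains d _ hc'

theorem pv_keys_foldl_stepA (l : List (String × Int)) (d : PySem.Dict String Int) :
    (l.foldl pvStepA d).keys = PySem.Set.update d.keys (l.map (·.1)) := by
  induction l generalizing d with
  | nil => rfl
  | cons p t ih =>
      simp only [List.foldl_cons, List.map_cons, PySem.Set.update_cons, ih, pv_keys_stepA]

-- running maximum, Option-valued: the value A's dict holds at a key after a weight stream
def pvOptMax : Option Int → List Int → Option Int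
  | o, [] => o
  | none, w :: ws => pvOptMax (some w) ws
  | some m, w :: ws => pvOptMax (some (if m < w then w else m)) ws

theorem pv_if_max (m w : Int) : (if m < w then w else m) = max m w := by
  rcases lt_or_ge m w with h | h <;> simp [max_def] <;> omega

theorem pv_optMax_some (ws : List Int) (m : Int) :
    pvOptMax (some m) ws = some (ws.foldl max m) := by
  induction ws generalizing m with
  | nil => rfl
  | cons w t ih => simp only [pvOptMax, List.foldl_cons, pv_if_max, ih]

-- one pvOptMax step absorbed on the left
theorem pv_optMax_cons (o : Option Int) (w : Int) (ws : List Int) :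
    pvOptMax o (w :: ws) = pvOptMax (pvOptMax o [w]) ws := by
  cases o <;> rfl

-- the value A's dict holds at k is the running max of the weights filed under k
theorem pv_get_foldl_stepA (l : List (String × Int)) (d : PySem.Dict String Int) (k : String) :
    (l.foldl pvStepA d).get? k =
      pvOptMax (d.get? k) ((l.filter (fun p => p.1 == k)).map (·.2)) := by
  induction l generalizing d with
  | nil => rfl
  | cons p t ih =>
      simp only [List.foldl_cons, ih]
      by_cases hpk : p.1 = k
      · subst hpk
        have hstep : (pvStepA d p).get? p.1 = pvOptMax (d.get? p.1) [p.2] := by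
          unfold pvStepA
          cases hd : d.get? p.1 with
          | none =>
              have hc : d.contains p.1 = false := by
                rw [PySem.Dict.contains_eq_isSome_get?, hd]; rfl
              simp [hc, PySem.Dict.get?_insert_self, pvOptMax]
          | some m =>
              have hc : d.contains p.1 = true := by
                rw [PySem.Dict.contains_eq_isSome_get?, hd]; rfl
              have hgd : d.getD p.1 0 = m := PySem.Dict.getD_of_get?_eq_some d 0 hd
              simp only [hc, if_true, hgd]
              by_cases hlt : m < p.2
              · have hgt : p.2 > m := hlt
                simp [hgt, PySem.Dict.get?_insert_self, pvOptMax]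
              · have hgt : ¬ p.2 > m := hlt
                simp [hgt, hd, pvOptMax]
        rw [hstep, ← pv_optMax_cons]
        congr 1
        simp
      · have hne : (p.1 == k) = false := by simpa using hpk
        have hne' : k ≠ p.1 := fun h => hpk h.symm
        have hstep : (pvStepA d p).get? k = d.get? k := by
          unfold pvStepA
          split
          · split
            · exact PySem.Dict.get?_insert_of_ne d _ hne'
            · rfl
          · exact PySem.Dict.get?_insert_of_ne d _ hne'
        rw [hstep]
        simp [hne]

-- pyMaxInt of a nonempty list is the running max from its head
theorem pv_optMax_none_nonempty (w : Int) (ws : List Int) :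
    pvOptMax none (w :: ws) = some (pyMaxInt (w :: ws)) := by
  simp only [pvOptMax, pyMaxInt, pv_optMax_some]

-- the heart: A's running-max dict over a pair stream has the same items as
-- B's group dict with each group reduced by max
theorem pv_items_eq (flat : List (String × Int)) :
    (flat.foldl pvStepA PySem.Dict.empty).items =
      (flat.foldl (fun g p => g.modify p.1 [] (fun ws => ws ++ [p.2])) PySem.Dict.empty).items.map
        (fun kv => (kv.1, pyMaxInt kv.2)) := by
  set G := flat.foldl (fun g p => g.modify p.1 [] (fun ws => ws ++ [p.2]))
    (PySem.Dict.empty : PySem.Dict String (List Int)) with hG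
  set D := flat.foldl pvStepA PySem.Dict.empty with hD
  have hkD : D.keys = PySem.Set.ofList (flat.map (·.1)) := by
    rw [hD, pv_keys_foldl_stepA, PySem.Dict.keys_empty, PySem.Set.update_nil_left]
  have hkG : G.keys = PySem.Set.ofList (flat.map (·.1)) := by
    rw [hG, PySem.Dict.keys_foldl_modify_key flat (·.1) [] (fun _ p => (· ++ [p.2])),
      PySem.Dict.keys_empty, PySem.Set.update_nil_left]
  have hndD : D.keys.Nodup := by rw [hkD]; exact PySem.Set.nodup_ofList _
  have hndG : G.keys.Nodup := by rw [hkG]; exact PySem.Set.nodup_ofList _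
  rw [PySem.Dict.items_eq_map_keys D hndD 0, PySem.Dict.items_eq_map_keys G hndG [],
    List.map_map, hkD, hkG]
  apply List.map_congr_left
  intro k hk
  simp only [Function.comp]
  have hkmem : k ∈ flat.map (·.1) := (PySem.Set.mem_ofList _ _).1 hk
  have hGk : G.getD k [] = (flat.filter (fun p => p.1 == k)).map (·.2) := by
    rw [hG, PySem.Dict.getD_foldl_modify_append, PySem.Dict.getD_empty, List.nil_append]
  obtain ⟨p, hp, hpk⟩ := List.mem_map.1 hkmem
  have hpf : p ∈ flat.filter (fun q => q.1 == k) :=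
    List.mem_filter.2 ⟨hp, by simp [hpk]⟩
  have hne : (flat.filter (fun q => q.1 == k)).map (·.2) ≠ [] := by
    simp only [ne_eq, List.map_eq_nil_iff]
    exact List.ne_nil_of_mem hpf
  obtain ⟨w, ws, hws⟩ := List.exists_cons_of_ne_nil hne
  have hget : D.get? k = some (pyMaxInt (w :: ws)) := by
    rw [hD, pv_get_foldl_stepA, PySem.Dict.get?_empty, hws, pv_optMax_none_nonempty]
  have : D.getD k 0 = pyMaxInt (w :: ws) := PySem.Dict.getD_of_get?_eq_some D 0 hget
  rw [this, hGk, hws]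

-- on a dict (nodup top-level keys) A's re-lookup returns the entry's own list
theorem pv_lookup_eq (kd : List (String × List (String × Int)))
    (h : (kd.map (·.1)).Nodup) (kv : String × List (String × Int)) (hm : kv ∈ kd) :
    (PySem.Dict.mk kd).getD kv.1 [] = kv.2 := by
  have hit : (kv.1, kv.2) ∈ (PySem.Dict.mk kd).items := by simpa using hm
  have hnd : (PySem.Dict.mk kd).keys.Nodup := by
    rw [PySem.Dict.keys_mk]; exact h
  exact PySem.Dict.getD_of_mem_items _ hit hnd []

-- ===== VERDICT (by name: the statement is the Claim_ definition above) =====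
theorem order_docs_spec : Claim_equal_order_docs := by
  intro kd _ hpre
  unfold Spec_order_docs order_docs order_docs_alt
  have hlook : kd.foldl (fun d kv => ((PySem.Dict.mk kd).getD kv.1 []).foldl pvStepA d)
      PySem.Dict.empty = kd.foldl (fun d kv => kv.2.foldl pvStepA d) PySem.Dict.empty := by
    apply PySem.List.foldl_congr_mem'
    intro kv hm acc
    rw [pv_lookup_eq kd hpre kv hm]
  rw [hlook, pv_foldl_nested kd (·.2) pvStepA,
    pv_foldl_nested kd (·.2)
      (fun (g : PySem.Dict String (List Int)) (p : String × Int) =>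
        g.modify p.1 [] (fun ws => ws ++ [p.2]))]
  simp only [pv_items_eq]
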